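-- pv_equiv track=rewrite | github.com/GetTalkDrops/plant-intel-mvp | ml-service/ai/pattern_explainer.py | _identify_quality_data_gaps
-- ===== SOURCE A (Python) =====
-- from typing import Dict, List, Optional
--
-- def _identify_quality_data_gaps(work_orders: List[Dict]) -> List[Dict]:
--     """Identify missing quality-related data"""
--     gaps = []
--
--     if not any(wo.get('defect_code') for wo in work_orders):
--         gaps.append({
--             'field': 'defect_code',
--             'impact': 'high',
--             'description': 'Cannot categorize defect types for targeted fixes'
--         })
--
--     if not any(wo.get('inspection_result') for wo in work_orders):
--         gaps.append({
--             'field': 'qc_inspection_result',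
--             'impact': 'medium',
--             'description': 'Cannot track quality at inspection points'
--         })
--
--     return gaps
-- ===== SOURCE B (Python) =====
-- from typing import Dict, List, Optional
--
-- _QUALITY_GAP_SPECS = [
--     ('defect_code', {
--         'field': 'defect_code',
--         'impact': 'high',
--         'description': 'Cannot categorize defect types for targeted fixes',
--     }),
--     ('inspection_result', {
--         'field': 'qc_inspection_result',
--         'impact': 'medium',
--         'description': 'Cannot track quality at inspection points',
--     }),
-- ]
--
--
-- def _identify_quality_data_gaps(work_orders: List[Dict]) -> List[Dict]:
--     """Identify missing quality-related data.
--
--     Builds the set of field names that carry a truthy value anywhere in the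
--     work orders, then keeps each entry of the declarative gap-spec table whose
--     source field is absent from that set.
--     """
--     present = {k for wo in work_orders for k, v in wo.items() if v}
--     return [dict(gap) for key, gap in _QUALITY_GAP_SPECS if key not in present]
-- ===== Notes on version B (the rewrite author's own statement) =====
-- stated objective: alternative
-- what changed: Replaces A's two per-field any() scans and hand-written appends with a different data structure: one pass collects the set of all truthy field names, and the output is a declarative gap-spec table filtered by set membership; Pre_ excludes association lists with duplicate keys inside a work order (unrepresentable as a Python dict), where first-match lookup vs key-set membership is representation-dependent.
import Mathlib
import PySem

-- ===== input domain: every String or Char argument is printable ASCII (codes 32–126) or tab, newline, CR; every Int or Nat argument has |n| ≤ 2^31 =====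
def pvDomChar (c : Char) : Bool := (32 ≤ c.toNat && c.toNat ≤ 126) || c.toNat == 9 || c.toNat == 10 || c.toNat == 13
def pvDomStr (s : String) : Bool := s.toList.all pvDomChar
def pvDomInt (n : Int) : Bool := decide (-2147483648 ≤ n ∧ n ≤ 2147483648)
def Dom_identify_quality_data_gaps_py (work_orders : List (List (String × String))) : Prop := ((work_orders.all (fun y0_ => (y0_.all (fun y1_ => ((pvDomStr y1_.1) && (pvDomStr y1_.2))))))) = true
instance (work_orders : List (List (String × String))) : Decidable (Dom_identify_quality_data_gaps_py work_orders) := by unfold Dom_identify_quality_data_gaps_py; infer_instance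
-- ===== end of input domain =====

-- B replaces A's two per-field any() scans with a set of all truthy field names filtered against a declarative gap-spec table (alternative decomposition, same cost).
-- ===== PORT A =====
-- truthiness of wo.get(k): key present with a nonempty (truthy) string value
def pvTruthyGet (wo : List (String × String)) (k : String) : Bool :=
  match PySem.Dict.get? (PySem.Dict.mk wo) k with
  | none => false
  | some v => v ≠ ""

def pvDefectGap : List (String × String) :=
  [("field", "defect_code"), ("impact", "high"),
   ("description", "Cannot categorize defect types for targeted fixes")]

def pvInspectionGap : List (String × String) :=
  [("field", "qc_inspection_result"), ("impact", "medium"),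
   ("description", "Cannot track quality at inspection points")]

def identify_quality_data_gaps_py (work_orders : List (List (String × String))) : List (List (String × String)) :=
  let gaps : List (List (String × String)) := []
  let gaps := if ¬ (work_orders.any (fun wo => pvTruthyGet wo "defect_code")) then gaps ++ [pvDefectGap] else gaps
  let gaps := if ¬ (work_orders.any (fun wo => pvTruthyGet wo "inspection_result")) then gaps ++ [pvInspectionGap] else gaps
  gaps

-- ===== PORT B =====
-- the declarative gap-spec table _QUALITY_GAP_SPECS
def pvGapSpecs : List (String × List (String × String)) :=
  [("defect_code", pvDefectGap), ("inspection_result", pvInspectionGap)]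

-- {k for wo in work_orders for k, v in wo.items() if v}  — wo.items() is the association list itself
def pvPresent (work_orders : List (List (String × String))) : PySem.Set String :=
  PySem.Set.ofList ((work_orders.flatMap (fun wo => wo.filter (fun p => p.2 ≠ ""))).map (·.1))

def identify_quality_data_gaps_py_alt (work_orders : List (List (String × String))) : List (List (String × String)) :=
  let present := pvPresent work_orders
  (pvGapSpecs.filter (fun spec => ¬ PySem.Set.contains present spec.1)).map (·.2)

-- ===== PRECONDITION & SPEC =====
-- Pre_ excludes work orders whose association lists carry duplicate keys: such lists cannot arise
-- from a Python dict, and on them A's first-match lookup vs B's key-set membership is a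
-- representation-dependent corner neither program specifies.
def Pre_identify_quality_data_gaps_py (work_orders : List (List (String × String))) : Prop :=
  ∀ wo ∈ work_orders, (wo.map Prod.fst).Nodup
instance (work_orders : List (List (String × String))) : Decidable (Pre_identify_quality_data_gaps_py work_orders) := by unfold Pre_identify_quality_data_gaps_py; infer_instance

def pvWitness_identify_quality_data_gaps_py : (List (List (String × String))) :=
  [[("defect_code", "D1"), ("inspection_result", "")], [("status", "open")]]

def Spec_identify_quality_data_gaps_py (work_orders : List (List (String × String))) (out : List (List (String × String))) : Prop := out = identify_quality_data_gaps_py_alt work_orders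
instance (work_orders : List (List (String × String))) (out : List (List (String × String))) : Decidable (Spec_identify_quality_data_gaps_py work_orders out) := by unfold Spec_identify_quality_data_gaps_py; infer_instance

-- ===== CLAIM (what is proved, stated in full; the proofs are below) =====
def Claim_equal_identify_quality_data_gaps_py : Prop := ∀ (work_orders : List (List (String × String))), Dom_identify_quality_data_gaps_py work_orders → Pre_identify_quality_data_gaps_py work_orders → Spec_identify_quality_data_gaps_py work_orders (identify_quality_data_gaps_py work_orders)

-- ===== LEMMAS AND PROOFS =====

-- On nodup-key work orders, k is in B's truthy-key set iff some work order has a truthy k (A's test).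
lemma mem_pvPresent_iff (work_orders : List (List (String × String))) (k : String)
    (hpre : Pre_identify_quality_data_gaps_py work_orders) :
    PySem.Set.contains (pvPresent work_orders) k = work_orders.any (fun wo => pvTruthyGet wo k) := by
  rcases h : work_orders.any (fun wo => pvTruthyGet wo k) with _ | _
  · -- no work order has a truthy k
    simp only [List.any_eq_false] at h
    rw [Bool.eq_false_iff]
    intro hc
    rw [PySem.Set.contains_iff] at hc
    unfold pvPresent at hc
    rw [PySem.Set.mem_ofList] at hc
    rcases List.mem_map.mp hc with ⟨p, hp, hpk⟩
    rcases List.mem_flatMap.mp hp with ⟨wo, hwo, hpwo⟩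
    rcases List.mem_filter.mp hpwo with ⟨hmem, hv⟩
    have := h wo hwo
    unfold pvTruthyGet at this
    have hget : (PySem.Dict.mk wo).get? k = some p.2 := by
      have : (PySem.Dict.mk wo).get? p.1 = some p.2 := by
        apply PySem.Dict.get?_of_mem_items
        · simpa [PySem.Dict.items] using hmem
        · simpa [PySem.Dict.keys_mk] using hpre wo hwo
      rwa [hpk] at this
    rw [hget] at this
    simp at this hv
    exact hv this
  · -- some work order has a truthy k
    simp only [List.any_eq_true] at h
    rcases h with ⟨wo, hwo, htr⟩
    unfold pvTruthyGet at htr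
    rcases hget : (PySem.Dict.mk wo).get? k with _ | v
    · rw [hget] at htr; simp at htr
    · rw [hget] at htr
      have hv : v ≠ "" := by simpa using htr
      have hmem : (k, v) ∈ wo := by
        have := PySem.Dict.mem_items_of_get?_eq_some _ hget
        simpa [PySem.Dict.items] using this
      rw [PySem.Set.contains_iff]
      unfold pvPresent
      rw [PySem.Set.mem_ofList]
      exact List.mem_map.mpr ⟨(k, v), List.mem_flatMap.mpr ⟨wo, hwo, List.mem_filter.mpr ⟨hmem, by simpa using hv⟩⟩, rfl⟩

-- ===== VERDICT (by name: the statement is the Claim_ definition above) =====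
theorem identify_quality_data_gaps_py_spec : Claim_equal_identify_quality_data_gaps_py := by
  intro work_orders _ hpre
  unfold Spec_identify_quality_data_gaps_py identify_quality_data_gaps_py identify_quality_data_gaps_py_alt
  simp only [pvGapSpecs, List.filter, mem_pvPresent_iff work_orders _ hpre]
  cases h1 : work_orders.any (fun wo => pvTruthyGet wo "defect_code") <;>
    cases h2 : work_orders.any (fun wo => pvTruthyGet wo "inspection_result") <;> simp
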